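-- pv_equiv track=rewrite | github.com/lkubicki/python | szyfr_kolumnowy.py | ustal_kolejnosc_kolumn
-- ===== SOURCE A (Python) =====
-- def ustal_kolejnosc_kolumn(klucz):
--     kolejnosc = []
--     litery = list(klucz)
--     litery.sort()
--
--     for i in range(len(klucz)):
--         zamiana = False
--         pozycja = 0
--         while not zamiana and pozycja < len(klucz):
--             if klucz[i] == litery[pozycja] and not zamiana:
--                 kolejnosc.append(pozycja)
--                 litery[pozycja] = '_'
--                 zamiana = True
--             pozycja+=1
--     return kolejnosc
-- ===== SOURCE B (Python) =====
-- def ustal_kolejnosc_kolumn(klucz):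
--     pierwsza = {}
--     for p, znak in enumerate(sorted(klucz)):
--         if znak not in pierwsza:
--             pierwsza[znak] = p
--     zajete = {}
--     kolejnosc = []
--     for znak in klucz:
--         k = zajete.get(znak, 0)
--         kolejnosc.append(pierwsza[znak] + k)
--         zajete[znak] = k + 1
--     return kolejnosc
-- ===== Notes on version B (the rewrite author's own statement) =====
-- stated objective: faster
-- what changed: Replaces the per-character linear scan-and-mark over a mutated sorted copy by one sort plus two dict passes (first sorted slot per character + running count of earlier equal characters), O(n log n) instead of O(n^2); Pre_ excludes keys in which some underscore is preceded by a character at or below the underscore in ASCII order, where A's in-band underscore taken-cell marker collides with underscores of the key and the repeated slot A returns (e.g. "__" -> [0, 0] vs B's [0, 1]) is an artefact of that marker.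
-- outside the precondition, e.g. on ustal_kolejnosc_kolumn('__'): A returns [0, 0], B returns [0, 1]; on ustal_kolejnosc_kolumn(' _'): A returns [0, 0], B returns [0, 1]
import Mathlib
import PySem

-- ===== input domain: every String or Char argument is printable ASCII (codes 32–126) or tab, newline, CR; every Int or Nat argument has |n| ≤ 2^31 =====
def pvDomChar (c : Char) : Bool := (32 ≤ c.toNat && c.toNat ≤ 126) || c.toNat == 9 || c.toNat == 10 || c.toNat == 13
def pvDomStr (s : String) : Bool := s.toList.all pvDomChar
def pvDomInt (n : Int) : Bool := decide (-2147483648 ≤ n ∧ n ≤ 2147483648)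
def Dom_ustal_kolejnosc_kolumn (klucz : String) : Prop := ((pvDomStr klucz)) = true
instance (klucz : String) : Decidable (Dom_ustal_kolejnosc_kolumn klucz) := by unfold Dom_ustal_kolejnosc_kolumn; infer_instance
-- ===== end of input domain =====

-- B replaces A's quadratic scan-and-mark over a mutated sorted copy by one sort plus two
-- dict passes (first sorted slot per character + running count of earlier equal characters).


-- ===== PORT A =====
-- the inner 'while not zamiana and pozycja < len(klucz)' loop: scan litery from position poz,
-- on the first cell equal to c report its index and overwrite that cell with '_'
def znajdzA (c : Char) : List Char → Nat → Option Nat × List Char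
  | [], _ => (none, [])
  | x :: xs, poz =>
    if c = x then (some poz, '_' :: xs)
    else
      let r := znajdzA c xs (poz + 1)
      (r.1, x :: r.2)

def ustal_kolejnosc_kolumn (klucz : String) : List Int :=
  -- litery = sorted(list(klucz))
  let litery0 := PySem.List.sorted klucz.toList (fun x => x) false
  -- for i in range(len(klucz)): scan-and-mark klucz[i] in litery, appending the found position
  let res := klucz.toList.foldl
    (fun (st : List Int × List Char) c =>
      match znajdzA c st.2 0 with
      | (some p, lit) => (st.1 ++ [(p : Int)], lit)
      | (none, lit) => (st.1, lit))
    ([], litery0)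
  res.1

-- ===== PORT B =====
def ustal_kolejnosc_kolumn_alt (klucz : String) : List Int :=
  let s := PySem.List.sorted klucz.toList (fun x => x) false
  -- pierwsza[znak] = first slot of znak in sorted(klucz)  ('if znak not in pierwsza' loop)
  let pierwsza := (PySem.List.enumerate s 0).foldl
    (fun (d : PySem.Dict Char Int) pc => if d.contains pc.2 then d else d.insert pc.2 pc.1)
    PySem.Dict.empty
  -- second loop: state (zajete, kolejnosc); pierwsza[znak] is exact via get?/getD: znak is
  -- always a character of klucz, hence a key of pierwsza
  let res := klucz.toList.foldl
    (fun (st : PySem.Dict Char Int × List Int) c =>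
      let k := st.1.getD c 0
      (st.1.insert c (k + 1), st.2 ++ [(pierwsza.get? c).getD 0 + k]))
    (PySem.Dict.empty, [])
  res.2

-- ===== PRECONDITION & SPEC =====
-- Pre_ excludes keys in which some underscore is preceded by a character at or below the
-- underscore in ASCII order: A marks taken cells of its sorted working copy with an in-band
-- underscore sentinel, so on such keys an underscore of the key matches an already-taken cell
-- and the returned slot (a repeat of an already-assigned column, e.g. "__" → [0, 0]) is an
-- artefact of that marker collision; B assigns each character its own sorted slot there
-- ("__" → [0, 1]).
def Pre_ustal_kolejnosc_kolumn (klucz : String) : Prop :=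
  ∀ i : Fin klucz.toList.length, klucz.toList[i.1]'i.2 = '_' →
    ∀ j : Fin i.1, '_' < klucz.toList[j.1]'(Nat.lt_trans j.2 i.2)
instance (klucz : String) : Decidable (Pre_ustal_kolejnosc_kolumn klucz) := by
  unfold Pre_ustal_kolejnosc_kolumn; infer_instance

def pvWitness_ustal_kolejnosc_kolumn : String := "tajny"

def Spec_ustal_kolejnosc_kolumn (klucz : String) (out : List Int) : Prop :=
  out = ustal_kolejnosc_kolumn_alt klucz
instance (klucz : String) (out : List Int) : Decidable (Spec_ustal_kolejnosc_kolumn klucz out) := by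
  unfold Spec_ustal_kolejnosc_kolumn; infer_instance

-- ===== CLAIM (what is proved, stated in full; the proofs are below) =====
def Claim_equal_ustal_kolejnosc_kolumn : Prop := ∀ (klucz : String), Dom_ustal_kolejnosc_kolumn klucz → Pre_ustal_kolejnosc_kolumn klucz → Spec_ustal_kolejnosc_kolumn klucz (ustal_kolejnosc_kolumn klucz)

-- ===== LEMMAS AND PROOFS =====

-- abbreviations for the proofs
def srt (l : List Char) : List Char := PySem.List.sorted l (fun x => x) false
def cntLt (l : List Char) (c : Char) : Nat := l.countP (fun x => decide (x < c))

-- what A's loop computes for character c after processed prefix t: for c ≠ '_' the rank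
-- (#smaller chars) + (#earlier equal chars); for '_' the first slot of the smallest character
-- among '_' and the prefix (A's scan matches taken cells, which all hold '_')
def specA (f : Char → Int) : List Char → List Char → List Int
  | [], _ => []
  | c :: r, t =>
    (if c = '_' then f (t.foldl min '_') else f c + (t.count c : Int)) :: specA f r (t ++ [c])

-- what B's loop computes: rank + #earlier equal chars, uniformly
def specB (f : Char → Int) : List Char → List Char → List Int
  | [], _ => []
  | c :: r, t => (f c + (t.count c : Int)) :: specB f r (t ++ [c])

-- A's litery after the prefix t has been processed: cell p of the sorted list is '_' iff it was
-- taken, i.e. iff p is among the first (count of s[p] in t) cells of its character's block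
def litF (l t : List Char) : List Char :=
  (srt l).zipIdx.map (fun p => if p.2 < cntLt l p.1 + t.count p.1 then '_' else p.1)

-- ===== facts about the running minimum =====

lemma foldl_min_le (t : List Char) : ∀ (a : Char), t.foldl min a ≤ a := by
  induction t with
  | nil => intro a; exact le_refl a
  | cons x t ih =>
    intro a
    simp only [List.foldl_cons]
    exact le_trans (ih (min a x)) (min_le_left a x)

lemma foldl_min_le_mem (t : List Char) : ∀ (a x : Char), x ∈ t → t.foldl min a ≤ x := by
  induction t with
  | nil => intro a x hx; simp at hx
  | cons y t ih =>
    intro a x hx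
    simp only [List.foldl_cons]
    rcases List.mem_cons.mp hx with rfl | hx
    · exact le_trans (foldl_min_le t (min a x)) (min_le_right a x)
    · exact ih (min a y) x hx

lemma foldl_min_mem (t : List Char) : ∀ (a : Char), t.foldl min a = a ∨ t.foldl min a ∈ t := by
  induction t with
  | nil => intro a; exact Or.inl rfl
  | cons x t ih =>
    intro a
    simp only [List.foldl_cons]
    rcases ih (min a x) with h | h
    · rw [h]
      rcases le_total a x with hax | hax
      · exact Or.inl (min_eq_left hax)
      · right
        rw [min_eq_right hax]
        exact List.mem_cons_self
    · exact Or.inr (List.mem_cons_of_mem x h)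

-- characters at positions below c's block are smaller than c
lemma lt_of_lt_cntLt (l : List Char) (c : Char) (p : Nat) (hp : p < (srt l).length)
    (h : p < cntLt (srt l) c) : (srt l)[p] < c := by
  by_contra hge
  rw [not_lt] at hge
  have hmono : ∀ q, (hq : q < (srt l).length) → p ≤ q → ¬ ((srt l)[q] < c) := by
    intro q hq hpq hlt
    have hle : (srt l)[p] ≤ (srt l)[q] := PySem.List.sorted_id_getElem_mono l hpq hq
    exact absurd (lt_of_le_of_lt (hge.trans hle) hlt) (lt_irrefl _)
  have hle2 : cntLt (srt l) c ≤ p := by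
    have hsplit : srt l = (srt l).take p ++ (srt l).drop p := (List.take_append_drop p (srt l)).symm
    have hdrop : ((srt l).drop p).countP (fun x => decide (x < c)) = 0 := by
      apply List.countP_eq_zero.mpr
      intro x hx
      obtain ⟨i, hi, rfl⟩ := List.getElem_of_mem hx
      have hil : p + i < (srt l).length := by simp at hi; omega
      rw [List.getElem_drop]
      simp only [decide_eq_true_eq]
      exact hmono (p + i) hil (by omega)
    have hcalc : cntLt (srt l) c = ((srt l).take p).countP (fun x => decide (x < c)) +
        ((srt l).drop p).countP (fun x => decide (x < c)) := by
      unfold cntLt; conv_lhs => rw [hsplit]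
      rw [List.countP_append]
    rw [hcalc, hdrop]
    have hl := List.countP_le_length (p := fun x => decide (x < c)) (l := (srt l).take p)
    simp at hl; omega
  omega

-- the block characterisation of a sorted list: s[p] = c iff p lies in c's block
lemma block (s : List Char) (hs : s.Pairwise (fun a b => a ≤ b)) (c : Char) :
    ∀ p, (hp : p < s.length) →
      (s[p] = c ↔ cntLt s c ≤ p ∧ p < cntLt s c + s.count c) := by
  unfold cntLt
  induction s with
  | nil => intro p hp; simp at hp
  | cons a s ih =>
    rw [List.pairwise_cons] at hs
    intro p hp
    cases p with
    | zero =>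
      simp only [List.getElem_cons_zero]
      constructor
      · rintro rfl
        have h1 : (a :: s).countP (fun x => decide (x < a)) = 0 := by
          apply List.countP_eq_zero.mpr
          intro x hx
          simp only [List.mem_cons] at hx
          rcases hx with rfl | hx
          · simp
          · simpa using not_lt.mpr (hs.1 x hx)
        refine ⟨by omega, ?_⟩
        have hpos : 0 < (a :: s).count a := by simp [List.count_cons_self]
        omega
      · rintro ⟨h1, h2⟩
        have hcnt : 0 < (a :: s).count c := by omega
        have hc : c ∈ a :: s := List.count_pos_iff.mp hcnt
        have hle : a ≤ c := by
          rcases List.mem_cons.mp hc with rfl | hmem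
          · exact le_refl _
          · exact hs.1 c hmem
        rcases eq_or_lt_of_le hle with rfl | hlt
        · rfl
        · exfalso
          have : 0 < (a :: s).countP (fun x => decide (x < c)) := by
            apply List.countP_pos_iff.mpr
            exact ⟨a, by simp, by simpa using hlt⟩
          omega
    | succ p =>
      simp only [List.getElem_cons_succ]
      have hp' : p < s.length := by simpa using hp
      rw [ih hs.2 p hp']
      by_cases hac : a < c
      · have hane : (a == c) = false := by simp; exact ne_of_lt hac
        simp [List.countP_cons, List.count_cons, hac, hane]
        omega
      · have h0 : s.countP (fun x => decide (x < c)) = 0 := by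
          apply List.countP_eq_zero.mpr
          intro x hx
          simp only [decide_eq_true_eq]
          exact fun hlt => hac (lt_of_le_of_lt (hs.1 x hx) hlt)
        have h0' : (a :: s).countP (fun x => decide (x < c)) = 0 := by
          simp [List.countP_cons, h0, hac]
        by_cases hca : a = c
        · subst hca
          rw [h0, h0', List.count_cons_self]
          omega
        · have hlt : c < a := lt_of_le_of_ne (not_lt.mp hac) (Ne.symm hca)
          have hnc : (a :: s).count c = 0 := by
            rw [List.count_eq_zero]
            intro hc
            rcases List.mem_cons.mp hc with rfl | hmem
            · exact absurd rfl (ne_of_lt hlt).symm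
            · exact absurd (lt_of_lt_of_le hlt (hs.1 c hmem)) (by simp)
          have hsc : s.count c = 0 := by
            have := hnc; rw [List.count_cons] at this
            by_cases h : c = a <;> simp [h] at this ⊢ <;> omega
          simp [h0, h0', hnc, hsc]

lemma srt_pairwise (l : List Char) : (srt l).Pairwise (fun a b => a ≤ b) := by
  simpa using PySem.List.sorted_pairwise l (fun x => x)

lemma srt_perm (l : List Char) : (srt l).Perm l := PySem.List.sorted_perm l _ _

lemma length_srt (l : List Char) : (srt l).length = l.length := (srt_perm l).length_eq

lemma cntLt_srt (l : List Char) (c : Char) : cntLt (srt l) c = cntLt l c :=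
  (srt_perm l).countP_eq _

lemma count_srt (l : List Char) (c : Char) : (srt l).count c = l.count c :=
  (srt_perm l).count_eq _

lemma cntLt_add_count_le (l : List Char) (c : Char) : cntLt l c + l.count c ≤ l.length := by
  induction l with
  | nil => simp [cntLt]
  | cons a l ih =>
    simp only [cntLt, List.countP_cons, List.count_cons, List.length_cons] at *
    by_cases h : a < c
    · have : (a == c) = false := by simp; exact ne_of_lt h
      simp [h, this]; omega
    · simp only [h, decide_false]
      by_cases h2 : a == c <;> simp [h2] <;> omega

-- ===== facts about litF =====

lemma length_litF (l t : List Char) : (litF l t).length = l.length := by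
  simp [litF, length_srt]

lemma litF_getElem (l t : List Char) (p : Nat) (hp : p < l.length) :
    (litF l t)[p]'(by rw [length_litF]; exact hp) =
      (if p < cntLt l ((srt l)[p]'(by rwa [length_srt])) +
            t.count ((srt l)[p]'(by rwa [length_srt])) then '_'
       else (srt l)[p]'(by rwa [length_srt])) := by
  simp [litF, List.getElem_zipIdx, cntLt_srt]

lemma litF_nil (l : List Char) : litF l [] = srt l := by
  apply List.ext_getElem (by simp [length_litF, length_srt])
  intro p hp hp'
  rw [litF_getElem l [] p (by rwa [length_srt] at hp')]
  have hblock := (block (srt l) (srt_pairwise l) ((srt l)[p]) p hp').mp rfl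
  rw [cntLt_srt] at hblock
  rw [List.count_nil, Nat.add_zero, if_neg (by omega)]

-- the scan-and-mark loop: if q is the first position holding c, it returns q (+ the start
-- offset) and marks cell q
lemma znajdzA_eq (c : Char) :
    ∀ (L : List Char) (q : Nat), (hq : q < L.length) → L[q] = c → (∀ p, (hp : p < q) → L[p]'(by omega) ≠ c) →
      ∀ n, znajdzA c L n = (some (q + n), L.set q '_') := by
  intro L
  induction L with
  | nil => intro q hq; simp at hq
  | cons x xs ih =>
    intro q hq hmatch hbefore n
    cases q with
    | zero =>
      simp only [List.getElem_cons_zero] at hmatch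
      subst hmatch
      simp [znajdzA]
    | succ q =>
      have hxc : ¬ (c = x) := fun h => hbefore 0 (by omega) (by simp [h])
      simp only [znajdzA, if_neg hxc]
      rw [ih q (by simpa using hq) (by simpa using hmatch)
        (fun p hp => by
          have := hbefore (p + 1) (by omega)
          simpa using this) (n + 1)]
      simp only [List.set_cons_succ, Prod.mk.injEq]
      exact ⟨congrArg some (by omega), trivial⟩

-- ===== the A-side invariant steps =====

-- scanning c ≠ '_' over litF l t finds exactly position cntLt l c + t.count c and marking it
-- produces litF l (t ++ [c])
lemma litF_step (l t : List Char) (c : Char) (hcne : c ≠ '_')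
    (hcount : t.count c + 1 ≤ l.count c) :
    znajdzA c (litF l t) 0 = (some (cntLt l c + t.count c), litF l (t ++ [c])) := by
  have hq : cntLt l c + t.count c < l.length := by
    have := cntLt_add_count_le l c; omega
  set q := cntLt l c + t.count c with hqdef
  have hqs : q < (srt l).length := by rwa [length_srt]
  have hsq : (srt l)[q] = c := by
    rw [block (srt l) (srt_pairwise l) c q hqs]
    rw [cntLt_srt, count_srt]
    omega
  have hmid : (litF l t)[q]'(by rw [length_litF]; exact hq) = c := by
    rw [litF_getElem l t q hq, hsq, if_neg (by omega)]
  have hbefore : ∀ p, (hp : p < q) → (litF l t)[p]'(by rw [length_litF]; omega) ≠ c := by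
    intro p hp
    have hpl : p < l.length := by omega
    have hps : p < (srt l).length := by rwa [length_srt]
    rw [litF_getElem l t p hpl]
    split_ifs with hmark
    · exact fun h => hcne h.symm
    · intro heq
      apply hmark
      rw [heq]
      omega
  rw [znajdzA_eq c (litF l t) q (by rw [length_litF]; exact hq) hmid hbefore 0]
  simp only [Nat.add_zero, Prod.mk.injEq]
  refine ⟨by trivial, ?_⟩
  apply List.ext_getElem (by simp [length_litF])
  intro p hp hp'
  have hpl : p < l.length := by rwa [length_litF] at hp'
  have hps : p < (srt l).length := by rwa [length_srt]
  rw [List.getElem_set]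
  rw [litF_getElem l (t ++ [c]) p hpl]
  have hcnt_app : (t ++ [c]).count ((srt l)[p]) =
      t.count ((srt l)[p]) + if (srt l)[p] = c then 1 else 0 := by
    rcases eq_or_ne ((srt l)[p]) c with hh | hh
    · subst hh; simp [List.count_append]
    · have hh2 : ¬ (c = (srt l)[p]) := fun h2 => hh h2.symm
      simp [List.count_append, List.count_singleton, hh2, hh]
  by_cases hpq : p = q
  · subst hpq
    rw [if_pos rfl, hcnt_app, hsq]
    have h1 : (if c = c then 1 else 0) = 1 := by simp
    rw [h1, if_pos (by omega)]
  · rw [if_neg (fun hh : q = p => hpq hh.symm), litF_getElem l t p hpl, hcnt_app]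
    by_cases hpc : (srt l)[p] = c
    · have hself := (block (srt l) (srt_pairwise l) c p hps).mp hpc
      rw [cntLt_srt, count_srt] at hself
      rw [hpc]
      have h1 : (if c = c then 1 else 0) = 1 := by simp
      rw [h1]
      split_ifs with h2 h3 h3 <;> first | rfl | (exfalso; omega)
    · rw [if_neg hpc, Nat.add_zero]

-- scanning '_' over litF l t finds the first cell holding '_': the first slot of the smallest
-- character among '_' and the prefix; marking it changes no cell value
lemma litF_step_us (l t : List Char) (hus : '_' ∈ l) (ht : ∀ x ∈ t, x ∈ l) :
    znajdzA '_' (litF l t) 0 = (some (cntLt l (t.foldl min '_')), litF l (t ++ ['_'])) := by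
  set m := t.foldl min '_' with hmdef
  have hm_le : m ≤ '_' := foldl_min_le t '_'
  have hm_mem : m = '_' ∨ m ∈ t := foldl_min_mem t '_'
  have hml : m ∈ l := by
    rcases hm_mem with hm | hm
    · rw [hm]; exact hus
    · exact ht m hm
  have hmcount : 1 ≤ l.count m := List.count_pos_iff.mpr hml
  have hq : cntLt l m < l.length := by
    have := cntLt_add_count_le l m; omega
  set q := cntLt l m with hqdef
  have hqs : q < (srt l).length := by rwa [length_srt]
  have hsq : (srt l)[q] = m := by
    rw [block (srt l) (srt_pairwise l) m q hqs]
    rw [cntLt_srt, count_srt]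
    omega
  have hmid : (litF l t)[q]'(by rw [length_litF]; exact hq) = '_' := by
    rw [litF_getElem l t q hq, hsq]
    rcases hm_mem with hm | hm
    · split_ifs with h
      · rfl
      · exact hm
    · have hcnt : 1 ≤ t.count m := List.count_pos_iff.mpr hm
      rw [if_pos (by omega)]
  have hbefore : ∀ p, (hp : p < q) → (litF l t)[p]'(by rw [length_litF]; omega) ≠ '_' := by
    intro p hp
    have hpl : p < l.length := by omega
    have hps : p < (srt l).length := by rwa [length_srt]
    have hplt : (srt l)[p] < m := by
      apply lt_of_lt_cntLt l m p hps
      rw [cntLt_srt]; omega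
    have hcnt0 : t.count ((srt l)[p]) = 0 := by
      rw [List.count_eq_zero]
      intro hmem
      exact absurd (foldl_min_le_mem t '_' _ hmem) (not_le.mpr hplt)
    have hself := (block (srt l) (srt_pairwise l) ((srt l)[p]) p hps).mp rfl
    rw [cntLt_srt] at hself
    rw [litF_getElem l t p hpl, hcnt0, if_neg (by omega)]
    exact ne_of_lt (lt_of_lt_of_le hplt hm_le)
  rw [znajdzA_eq '_' (litF l t) q (by rw [length_litF]; exact hq) hmid hbefore 0]
  simp only [Nat.add_zero, Prod.mk.injEq]
  refine ⟨by trivial, ?_⟩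
  apply List.ext_getElem (by simp [length_litF])
  intro p hp hp'
  have hpl : p < l.length := by rwa [length_litF] at hp'
  have hps : p < (srt l).length := by rwa [length_srt]
  rw [List.getElem_set]
  rw [litF_getElem l (t ++ ['_']) p hpl]
  have hcnt_app : (t ++ ['_']).count ((srt l)[p]) =
      t.count ((srt l)[p]) + if (srt l)[p] = '_' then 1 else 0 := by
    rcases eq_or_ne ((srt l)[p]) '_' with hh | hh
    · rw [hh]; simp [List.count_append]
    · have hh2 : ¬ ('_' = (srt l)[p]) := fun h2 => hh h2.symm
      simp [List.count_append, List.count_singleton, hh2, hh]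
  by_cases hpq : p = q
  · subst hpq
    rw [if_pos rfl, hcnt_app, hsq]
    by_cases hmu : m = '_'
    · have h1 : (if m = '_' then 1 else 0) = 1 := if_pos hmu
      rw [h1, if_pos (by omega)]
    · have hm2 : m ∈ t := by
        rcases hm_mem with h | h
        · exact absurd h hmu
        · exact h
      have hcnt : 1 ≤ t.count m := List.count_pos_iff.mpr hm2
      have h1 : (if m = '_' then 1 else 0) = 0 := if_neg hmu
      rw [h1, if_pos (by omega)]
  · rw [if_neg (fun hh : q = p => hpq hh.symm), litF_getElem l t p hpl, hcnt_app]
    by_cases hpc : (srt l)[p] = '_'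
    · rw [hpc]
      split_ifs <;> rfl
    · rw [if_neg hpc, Nat.add_zero]

-- the A-side loop invariant
lemma A_fold (l : List Char) :
    ∀ (r t : List Char) (acc : List Int), l = t ++ r →
      (r.foldl
        (fun (st : List Int × List Char) c =>
          match znajdzA c st.2 0 with
          | (some p, lit) => (st.1 ++ [(p : Int)], lit)
          | (none, lit) => (st.1, lit))
        (acc, litF l t)).1 = acc ++ specA (fun c => (cntLt l c : Int)) r t := by
  intro r
  induction r with
  | nil => intro t acc _; simp [specA]
  | cons c r' ih =>
    intro t acc hsplit
    rw [List.foldl_cons]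
    by_cases hc : c = '_'
    · subst hc
      rw [litF_step_us l t
        (by rw [hsplit]; exact List.mem_append_right t List.mem_cons_self)
        (fun x hx => by rw [hsplit]; exact List.mem_append_left _ hx)]
      have hih := ih (t ++ ['_']) (acc ++ [((cntLt l (t.foldl min '_') : Nat) : Int)])
        (by simpa using hsplit)
      simp only [hih, specA]
      simp [List.append_assoc]
    · have hcount : t.count c + 1 ≤ l.count c := by
        subst hsplit; simp [List.count_append, List.count_cons_self]
      rw [litF_step l t c hc hcount]
      have hih := ih (t ++ [c]) (acc ++ [((cntLt l c + t.count c : Nat) : Int)])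
        (by simpa using hsplit)
      simp only [hih, specA]
      simp [hc, List.append_assoc, Nat.cast_add]

-- ===== the B-side lemmas =====

-- once a key is present, the 'if znak not in pierwsza' loop never changes its value
lemma pierwsza_fold_frozen (c : Char) :
    ∀ (ps : List (Int × Char)) (d : PySem.Dict Char Int), d.contains c = true →
      (ps.foldl (fun (d : PySem.Dict Char Int) pc =>
        if d.contains pc.2 then d else d.insert pc.2 pc.1) d).get? c = d.get? c := by
  intro ps
  induction ps with
  | nil => intro d _; rfl
  | cons p ps ih =>
    intro d hd
    rw [List.foldl_cons]
    by_cases h : d.contains p.2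
    · rw [if_pos h, ih d hd]
    · rw [if_neg h]
      have hne : c ≠ p.2 := fun heq => h (heq ▸ hd)
      rw [ih _ (by rw [PySem.Dict.contains_insert]; simp [hd]),
        PySem.Dict.get?_insert_of_ne _ _ hne]

-- the first-occurrence loop maps c to the index of c's first occurrence
lemma pierwsza_fold_idxOf (c : Char) :
    ∀ (s : List Char) (n : Int) (d : PySem.Dict Char Int), d.contains c = false → c ∈ s →
      ((PySem.List.enumerate s n).foldl (fun (d : PySem.Dict Char Int) pc =>
        if d.contains pc.2 then d else d.insert pc.2 pc.1) d).get? c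
        = some (n + (s.idxOf c : Int)) := by
  intro s
  induction s with
  | nil => intro n d _ hc; simp at hc
  | cons x s ih =>
    intro n d hd hc
    rw [PySem.List.enumerate_cons, List.foldl_cons]
    by_cases hxc : x = c
    · rw [if_neg (by rw [hxc]; simp [hd]), hxc]
      rw [pierwsza_fold_frozen c _ _ (by rw [PySem.Dict.contains_insert]; simp)]
      rw [PySem.Dict.get?_insert_self]
      simp [List.idxOf_cons_self]
    · have hcs : c ∈ s := by
        rcases List.mem_cons.mp hc with h | h
        · exact absurd h.symm hxc
        · exact h
      have harith : (n + 1) + (s.idxOf c : Int) = n + ((s.idxOf c + 1 : Nat) : Int) := by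
        push_cast; ring
      by_cases h : d.contains x
      · rw [if_pos h, ih (n + 1) d hd hcs, List.idxOf_cons_ne _ hxc, harith]
      · have hd' : (d.insert x n).contains c = false := by
          rw [PySem.Dict.contains_insert]
          simp only [hd, Bool.or_false, beq_eq_false_iff_ne, ne_eq]
          exact fun hh => hxc hh.symm
        rw [if_neg h, ih (n + 1) _ hd' hcs, List.idxOf_cons_ne _ hxc, harith]

-- in a sorted list the first occurrence of c sits at index (#elements < c)
lemma idxOf_sorted (c : Char) :
    ∀ (s : List Char), s.Pairwise (fun a b => a ≤ b) → c ∈ s →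
      s.idxOf c = s.countP (fun x => decide (x < c)) := by
  intro s
  induction s with
  | nil => intro _ hc; simp at hc
  | cons a s ih =>
    intro hs hc
    rw [List.pairwise_cons] at hs
    by_cases hac : a = c
    · subst hac
      rw [List.idxOf_cons_self]
      symm
      apply List.countP_eq_zero.mpr
      intro x hx
      simp only [decide_eq_true_eq]
      rcases List.mem_cons.mp hx with rfl | hmem
      · simp
      · exact not_lt.mpr (hs.1 x hmem)
    · have hcs : c ∈ s := by rcases List.mem_cons.mp hc with h | h; exact absurd h.symm hac; exact h
      have halt : a < c := lt_of_le_of_ne (hs.1 c hcs) hac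
      rw [List.idxOf_cons_ne _ hac, List.countP_cons, ih hs.2 hcs]
      simp [halt]

-- B's first pass: pierwsza.get? c = some (cntLt l c) for every c of l
lemma pierwsza_spec (l : List Char) (c : Char) (hc : c ∈ l) :
    (((PySem.List.enumerate (srt l) 0).foldl
      (fun (d : PySem.Dict Char Int) pc => if d.contains pc.2 then d else d.insert pc.2 pc.1)
      PySem.Dict.empty).get? c) = some ((cntLt l c : Nat) : Int) := by
  have hcs : c ∈ srt l := (PySem.List.mem_sorted l _ _ c).mpr hc
  rw [pierwsza_fold_idxOf c (srt l) 0 PySem.Dict.empty (by simp [pysem]) hcs]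
  rw [idxOf_sorted c (srt l) (srt_pairwise l) hcs]
  rw [show (srt l).countP (fun x => decide (x < c)) = cntLt l c from cntLt_srt l c]
  simp

-- the B-side loop invariant: the dict is the counter of the processed prefix
lemma B_fold (sm : PySem.Dict Char Int) :
    ∀ (r t : List Char) (acc : List Int),
      (r.foldl
        (fun (st : PySem.Dict Char Int × List Int) c =>
          let k := st.1.getD c 0
          (st.1.insert c (k + 1), st.2 ++ [(sm.get? c).getD 0 + k]))
        (PySem.Dict.counter t, acc)).2
      = acc ++ specB (fun c => (sm.get? c).getD 0) r t := by
  intro r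
  induction r with
  | nil => intro t acc; simp [specB]
  | cons c r' ih =>
    intro t acc
    have hcounter : (PySem.Dict.counter t).insert c ((PySem.Dict.counter t).getD c 0 + 1)
        = PySem.Dict.counter (t ++ [c]) := by
      rw [← PySem.Dict.foldl_insert_getD_add_one_eq_counter t,
          ← PySem.Dict.foldl_insert_getD_add_one_eq_counter (t ++ [c]),
          List.foldl_append]
      rfl
    have hcnt : (PySem.Dict.counter t).getD c 0 = (t.count c : Int) := PySem.Dict.getD_counter t c
    have hstep : (let k := (PySem.Dict.counter t).getD c 0
        ((PySem.Dict.counter t).insert c (k + 1), acc ++ [(sm.get? c).getD 0 + k]))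
        = (PySem.Dict.counter (t ++ [c]), acc ++ [(sm.get? c).getD 0 + (t.count c : Int)]) := by
      show ((PySem.Dict.counter t).insert c ((PySem.Dict.counter t).getD c 0 + 1),
            acc ++ [(sm.get? c).getD 0 + (PySem.Dict.counter t).getD c 0]) = _
      rw [hcounter, hcnt]
    rw [List.foldl_cons, hstep, ih (t ++ [c]) (acc ++ [(sm.get? c).getD 0 + (t.count c : Int)])]
    simp [specB, List.append_assoc]

-- B's port equals specB with the rank function
lemma B_eq_specB (klucz : String) :
    ustal_kolejnosc_kolumn_alt klucz
      = specB (fun c => ((((PySem.List.enumerate (srt klucz.toList) 0).foldl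
          (fun (d : PySem.Dict Char Int) pc => if d.contains pc.2 then d else d.insert pc.2 pc.1)
          PySem.Dict.empty)).get? c).getD 0) klucz.toList [] := by
  show (klucz.toList.foldl
      (fun (st : PySem.Dict Char Int × List Int) c =>
        let k := st.1.getD c 0
        (st.1.insert c (k + 1), st.2 ++ [((((PySem.List.enumerate (srt klucz.toList) 0).foldl
          (fun (d : PySem.Dict Char Int) pc => if d.contains pc.2 then d else d.insert pc.2 pc.1)
          PySem.Dict.empty)).get? c).getD 0 + k]))
      (PySem.Dict.empty, [])).2 = _
  have h0 : (PySem.Dict.empty : PySem.Dict Char Int) = PySem.Dict.counter ([] : List Char) := rfl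
  rw [h0, B_fold]
  simp

-- specB only uses f on characters of r
lemma specB_congr (f f' : Char → Int) :
    ∀ (r t : List Char), (∀ c ∈ r, f c = f' c) → specB f r t = specB f' r t := by
  intro r
  induction r with
  | nil => intro t _; rfl
  | cons c r ih =>
    intro t h
    simp only [specB]
    rw [h c List.mem_cons_self]
    exact congrArg _ (ih (t ++ [c]) (fun x hx => h x (List.mem_cons_of_mem c hx)))

-- if every element of t exceeds '_', the running minimum stays '_' and t holds no '_'
lemma min_of_all_gt (t : List Char) (h : ∀ x ∈ t, '_' < x) :
    t.foldl min '_' = '_' ∧ t.count '_' = 0 := by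
  constructor
  · rcases foldl_min_mem t '_' with hm | hm
    · exact hm
    · exact absurd (foldl_min_le t '_') (not_le.mpr (h _ hm))
  · rw [List.count_eq_zero]
    intro hmem
    exact absurd (h _ hmem) (lt_irrefl _)

-- outside D_, A's min rule for '_' collapses to B's rank rule
lemma specA_eq_specB (l : List Char)
    (H : ∀ i, (hi : i < l.length) → l[i] = '_' → ∀ j, (hj : j < i) → '_' < l[j]'(by omega)) (f : Char → Int) :
    ∀ (r t : List Char), l = t ++ r → specA f r t = specB f r t := by
  intro r
  induction r with
  | nil => intro t _; rfl
  | cons c r' ih =>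
    intro t hsplit
    simp only [specA, specB]
    have htail := ih (t ++ [c]) (by simpa using hsplit)
    by_cases hc : c = '_'
    · subst hc
      have hgt : ∀ x ∈ t, '_' < x := by
        intro x hx
        obtain ⟨j, hj, rfl⟩ := List.getElem_of_mem hx
        have hi : t.length < l.length := by
          rw [hsplit]; simp
        have hival : l[t.length]'hi = '_' := by
          subst hsplit
          rw [List.getElem_append_right (le_refl t.length)]
          simp
        have hjl : j < l.length := by omega
        have hjval : l[j]'hjl = t[j]'hj := by
          subst hsplit
          rw [List.getElem_append_left]
        have := H t.length hi hival j hj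
        rwa [hjval] at this
      obtain ⟨hmin, hcnt⟩ := min_of_all_gt t hgt
      rw [if_pos rfl, hmin, hcnt, htail]
      simp
    · rw [if_neg hc, htail]

-- Pre_ in unbundled pointwise form
lemma pre_pointwise (klucz : String) (hP : Pre_ustal_kolejnosc_kolumn klucz) :
    ∀ i, (hi : i < klucz.toList.length) → klucz.toList[i] = '_' →
      ∀ j, (hj : j < i) → '_' < klucz.toList[j]'(by omega) := by
  intro i hi hival j hj
  exact hP ⟨i, hi⟩ hival ⟨j, hj⟩

-- the two ports agree on Pre_
lemma main_eq (klucz : String) (hP : Pre_ustal_kolejnosc_kolumn klucz) :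
    ustal_kolejnosc_kolumn klucz = ustal_kolejnosc_kolumn_alt klucz := by
  have hA : ustal_kolejnosc_kolumn klucz
      = specA (fun c => (cntLt klucz.toList c : Int)) klucz.toList [] := by
    show (klucz.toList.foldl
        (fun (st : List Int × List Char) c =>
          match znajdzA c st.2 0 with
          | (some p, lit) => (st.1 ++ [(p : Int)], lit)
          | (none, lit) => (st.1, lit))
        ([], srt klucz.toList)).1 = _
    have := A_fold klucz.toList klucz.toList [] [] rfl
    rw [litF_nil] at this
    simpa using this
  rw [hA, B_eq_specB klucz]
  rw [specA_eq_specB klucz.toList (pre_pointwise klucz hP) _ klucz.toList [] rfl]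
  apply specB_congr
  intro c hc
  rw [pierwsza_spec klucz.toList c hc]
  rfl

-- ===== VERDICT (by name: the statement is the Claim_ definition above) =====
theorem ustal_kolejnosc_kolumn_spec : Claim_equal_ustal_kolejnosc_kolumn := by
  intro klucz _ hP
  exact main_eq klucz hP
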